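-- pv_equiv track=rewrite | github.com/cmyjf/computing_generality_B | 第九周/第九周.py | dfs
-- ===== SOURCE A (Python) =====
-- def dfs(n,k):
--     if k == 1:
--         return 1
--     else:
--         s = 0
--         for i in range(n//k+1):
--             s += dfs(n-k*i,k-1)
--         return s
-- ===== SOURCE B (Python) =====
-- def dfs(n, k):
--     # Bottom-up DP: row j holds, for each m in 0..n, the number of
--     # partitions of m into parts 1..j (equals dfs(m, j)); O(n*k) instead
--     # of A's exponential recursion.
--     if k == 1:
--         return 1
--     if n < 0:
--         return 0
--     prev = [1] * (n + 1)          # row for j = 1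
--     for j in range(2, k + 1):
--         cur = []
--         for m in range(n + 1):
--             c = prev[m]
--             if m >= j:
--                 c += cur[m - j]
--             cur.append(c)
--         prev = cur
--     return prev[n]
-- ===== Notes on version B (the rewrite author's own statement) =====
-- stated objective: faster
-- what changed: Replaces A's exponential recursion (a sum of recursive calls per state, recomputing states) by a bottom-up dynamic-programming table over (part j, amount m) with the unbounded-knapsack recurrence cur[m] = prev[m] + cur[m-j].
-- outside the precondition, e.g. on dfs(5, -1): A returns 0, B returns 1; on dfs(0, 0): A raises ZeroDivisionError, B returns 1; on dfs(-1, -2): A raises RecursionError, B returns 0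
import Mathlib
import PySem

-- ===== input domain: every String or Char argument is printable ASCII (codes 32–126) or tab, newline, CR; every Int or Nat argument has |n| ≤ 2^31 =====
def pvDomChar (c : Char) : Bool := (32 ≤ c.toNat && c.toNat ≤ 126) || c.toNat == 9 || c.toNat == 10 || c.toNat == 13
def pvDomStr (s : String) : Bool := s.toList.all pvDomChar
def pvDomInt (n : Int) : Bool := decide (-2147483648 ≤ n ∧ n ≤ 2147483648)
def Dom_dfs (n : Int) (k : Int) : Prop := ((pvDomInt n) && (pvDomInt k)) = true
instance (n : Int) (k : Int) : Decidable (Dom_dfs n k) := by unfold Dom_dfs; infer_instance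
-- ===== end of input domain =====

-- B replaces A's exponential recursion by a bottom-up DP over (part j, amount m); proved equal for k ≥ 1.

-- ===== PORT A =====
def dfs (n : Int) (k : Int) : Int :=
  if k == 1 then 1
  else if _h : k ≤ 1 then 0
  else
    (PySem.List.pyRange 0 (PySem.Int.floordiv n k + 1) 1).foldl
      (fun s i => s + dfs (n - k * i) (k - 1)) 0
termination_by k.toNat
decreasing_by omega

-- ===== PORT B =====
-- inner loop of Source B: for m in range(n+1): c = prev[m]; (if m >= j: c += cur[m-j]); cur.append(c)
-- (list indices m and m-j are in range in the Python, so getD's default is never used)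
def dfsRow (N : Nat) (j : Int) (prev : List Int) : List Int :=
  (List.range (N + 1)).foldl
    (fun cur m =>
      cur ++ [prev.getD m 0 + (if j ≤ (m : Int) then cur.getD (m - j.toNat) 0 else 0)]) []

def dfs_alt (n : Int) (k : Int) : Int :=
  if k == 1 then 1
  else if n < 0 then 0
  else
    ((PySem.List.pyRange 2 (k + 1) 1).foldl
       (fun prev j => dfsRow n.toNat j prev)
       (List.replicate (n.toNat + 1) 1)).getD n.toNat 0

-- ===== PRECONDITION & SPEC =====
-- Pre_ restricts to the natural domain k >= 1: for k = 0 A raises ZeroDivisionError, for k < 0 it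
-- either hits the recursion limit (n <= 0, RecursionError) or returns an accidental 0 from a loop
-- over an empty range (n > 0) -- an artefact outside the function's purpose.
def Pre_dfs (n : Int) (k : Int) : Prop := 1 ≤ k
instance (n : Int) (k : Int) : Decidable (Pre_dfs n k) := by unfold Pre_dfs; infer_instance
def pvWitness_dfs : Int × Int := (7, 3)
def Spec_dfs (n : Int) (k : Int) (out : Int) : Prop := out = dfs_alt n k
instance (n : Int) (k : Int) (out : Int) : Decidable (Spec_dfs n k out) := by unfold Spec_dfs; infer_instance

-- ===== CLAIM (what is proved, stated in full; the proofs are below) =====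
def Claim_equal_dfs : Prop := ∀ (n : Int) (k : Int), Dom_dfs n k → Pre_dfs n k → Spec_dfs n k (dfs n k)

-- ===== LEMMAS AND PROOFS =====

theorem dfs_one (n : Int) : dfs n 1 = 1 := by
  rw [dfs]; rfl

theorem dfs_sum (n k : Int) (hk : 2 ≤ k) :
    dfs n k =
      ((PySem.List.pyRange 0 (PySem.Int.floordiv n k + 1) 1).map
        (fun i => dfs (n - k * i) (k - 1))).sum := by
  rw [dfs, if_neg (by simp; omega), dif_neg (by omega), PySem.List.foldl_add]
  ring

theorem dfs_neg (n k : Int) (hk : 2 ≤ k) (hn : n < 0) : dfs n k = 0 := by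
  rw [dfs_sum n k hk, PySem.List.pyRange_one_eq_nil (by
    have := (PySem.Int.floordiv_lt_iff_lt_mul (a := n) (b := k) (q := 0) (by omega)).2 (by omega)
    omega)]
  simp

theorem dfs_rec (n k : Int) (hk : 2 ≤ k) (hn : 0 ≤ n) :
    dfs n k = dfs n (k - 1) + (if k ≤ n then dfs (n - k) k else 0) := by
  rcases lt_or_ge n k with h | h
  · -- 0 ≤ n < k : floordiv = 0
    have hq : PySem.Int.floordiv n k = 0 :=
      (PySem.Int.floordiv_eq_iff_of_pos (by omega)).2 (by constructor <;> omega)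
    rw [dfs_sum n k hk, hq, if_neg (by omega)]
    rw [show (0:Int) + 1 = 0 + 1 by ring, PySem.List.pyRange_one_singleton]
    simp
  · -- k ≤ n
    have hqpos : 1 ≤ PySem.Int.floordiv n k :=
      (PySem.Int.le_floordiv_iff_mul_le (by omega)).2 (by omega)
    have hq' : PySem.Int.floordiv (n - k) k = PySem.Int.floordiv n k - 1 := by
      have hb := PySem.Int.floordiv_mul_add_mod n k
      have h1 := PySem.Int.mod_nonneg n (b := k) (by omega)
      have h2 := PySem.Int.mod_lt n (b := k) (by omega)
      apply (PySem.Int.floordiv_eq_iff_of_pos (by omega)).2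
      constructor <;> nlinarith
    rw [dfs_sum n k hk, dfs_sum (n - k) k hk, if_pos h, hq']
    rw [PySem.List.pyRange_one_cons (a := 0) (by omega)]
    simp only [List.map_cons, List.sum_cons, mul_zero, sub_zero]
    congr 1
    rw [PySem.List.pyRange_one, PySem.List.pyRange_one]
    simp only [List.map_map]
    have hlen : (PySem.Int.floordiv n k + 1 - (0 + 1)).toNat
        = (PySem.Int.floordiv n k - 1 + 1 - 0).toNat := by omega
    rw [hlen]
    apply congrArg
    apply List.map_congr_left
    intro t _
    simp only [Function.comp_apply]
    have harg : n - k * (0 + 1 + (t : Int)) = n - k - k * (0 + (t : Int)) := by ring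
    rw [harg]

-- row of the DP table: entry m is dfs m j
def dfsTab (N : Nat) (j : Int) : List Int :=
  (List.range (N + 1)).map (fun (m : Nat) => dfs (m : Int) j)

theorem dfsRow_eq (N : Nat) (j : Int) (hj : 2 ≤ j) :
    dfsRow N j (dfsTab N (j - 1)) = dfsTab N j := by
  have key : ∀ t : Nat, t ≤ N + 1 →
      (List.range t).foldl
        (fun cur m =>
          cur ++ [(dfsTab N (j-1)).getD m 0 + (if j ≤ (m : Int) then cur.getD (m - j.toNat) 0 else 0)]) []
      = (List.range t).map (fun (m : Nat) => dfs (m : Int) j) := by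
    intro t
    induction t with
    | zero => intro; simp
    | succ t ih =>
      intro ht
      rw [List.range_succ, List.foldl_append, List.map_append, ih (by omega)]
      simp only [List.foldl_cons, List.foldl_nil, List.map_cons, List.map_nil]
      congr 1
      have hprev : (dfsTab N (j-1)).getD t 0 = dfs (t : Int) (j - 1) := by
        unfold dfsTab; exact PySem.List.getD_map_range _ _ _ _ (by omega)
      rw [hprev, dfs_rec (t : Int) j hj (by positivity)]
      congr 1
      by_cases hc : j ≤ (t : Int)
      · rw [if_pos hc, if_pos hc]
        have hlt : t - j.toNat < t := by omega
        rw [PySem.List.getD_map_range _ _ _ _ hlt]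
        have hcast : ((t - j.toNat : Nat) : Int) = (t : Int) - j := by omega
        rw [hcast]
      · rw [if_neg hc, if_neg hc]
  unfold dfsRow dfsTab
  exact key (N + 1) le_rfl

theorem dfsTab_one (N : Nat) : dfsTab N 1 = List.replicate (N + 1) 1 := by
  unfold dfsTab
  rw [List.eq_replicate_iff]
  constructor
  · simp
  · intro b hb
    obtain ⟨m, _, rfl⟩ := List.mem_map.1 hb
    exact dfs_one _

theorem dfs_fold (N : Nat) : ∀ (c : Nat) (k : Int), k = 1 + (c : Int) →
    (PySem.List.pyRange 2 (k + 1) 1).foldl (fun prev j => dfsRow N j prev)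
      (List.replicate (N + 1) 1) = dfsTab N k := by
  intro c
  induction c with
  | zero =>
    intro k hk
    rw [hk]
    rw [show ((1:Int) + (0:Nat) + 1) = 2 by simp]
    rw [PySem.List.pyRange_one_eq_nil le_rfl]
    simp [dfsTab_one]
  | succ c ih =>
    intro k hk
    have h2 : 2 ≤ k := by omega
    rw [show k + 1 = k + 1 by rfl, PySem.List.pyRange_one_succ_right (by omega : (2:Int) ≤ k)]
    rw [List.foldl_append]
    have hih := ih (k - 1) (by push_cast at hk ⊢; omega)
    rw [show PySem.List.pyRange 2 k 1 = PySem.List.pyRange 2 (k - 1 + 1) 1 by norm_num] at *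
    rw [hih]
    simp only [List.foldl_cons, List.foldl_nil]
    exact dfsRow_eq N k h2

-- ===== VERDICT (by name: the statement is the Claim_ definition above) =====
theorem dfs_spec : Claim_equal_dfs := by
  intro n k _ hpre
  unfold Spec_dfs dfs_alt
  by_cases hk1 : k = 1
  · subst hk1; simp [dfs_one]
  · have hk : 2 ≤ k := by unfold Pre_dfs at hpre; omega
    rw [if_neg (by simp [hk1])]
    by_cases hn : n < 0
    · rw [if_pos hn, dfs_neg n k hk hn]
    · rw [if_neg hn]
      rw [dfs_fold n.toNat (k - 1).toNat k (by omega)]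
      unfold dfsTab
      rw [PySem.List.getD_map_range _ _ _ _ (by omega)]
      congr 1
      omega
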